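-- pv_equiv track=rewrite | github.com/lxwudi/Youth-Basketball-Training-Monitoring-System | multi_scene_monitoring/modules/draw.py | _find_segment_color
-- ===== SOURCE A (Python) =====
-- HEAD_SET = {1, 15, 16, 17, 18}
--
-- TORSO_SET = {0, 2}
--
-- LEFT_ARM_SET = {3, 4, 5}
--
-- RIGHT_ARM_SET = {9, 10, 11}
--
-- LEFT_LEG_SET = {6, 7, 8}
--
-- RIGHT_LEG_SET = {12, 13, 14}
--
-- SEGMENT_COLORS = {
--     "head": (250, 235, 215),
--     "torso": (255, 180, 90),
--     "left_arm": (255, 120, 120),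
--     "right_arm": (120, 200, 255),
--     "left_leg": (120, 255, 180),
--     "right_leg": (255, 200, 130),
-- }
--
-- def _find_segment_color(idx_a: int, idx_b: int) -> tuple[int, int, int]:
--     groups = [
--         (HEAD_SET, "head"),
--         (TORSO_SET, "torso"),
--         (LEFT_ARM_SET, "left_arm"),
--         (RIGHT_ARM_SET, "right_arm"),
--         (LEFT_LEG_SET, "left_leg"),
--         (RIGHT_LEG_SET, "right_leg"),
--     ]
--     for group, label in groups:
--         if idx_a in group and idx_b in group:
--             return SEGMENT_COLORS[label]
--     return (255, 220, 150)
-- ===== SOURCE B (Python) =====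
-- SEGMENT_COLORS = {
--     "head": (250, 235, 215),
--     "torso": (255, 180, 90),
--     "left_arm": (255, 120, 120),
--     "right_arm": (120, 200, 255),
--     "left_leg": (120, 255, 180),
--     "right_leg": (255, 200, 130),
-- }
--
-- _IDX_TO_LABEL = {
--     1: "head", 15: "head", 16: "head", 17: "head", 18: "head",
--     0: "torso", 2: "torso",
--     3: "left_arm", 4: "left_arm", 5: "left_arm",
--     9: "right_arm", 10: "right_arm", 11: "right_arm",
--     6: "left_leg", 7: "left_leg", 8: "left_leg",
--     12: "right_leg", 13: "right_leg", 14: "right_leg",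
-- }
--
--
-- def _find_segment_color(idx_a: int, idx_b: int) -> tuple[int, int, int]:
--     la = _IDX_TO_LABEL.get(idx_a)
--     if la is not None and la == _IDX_TO_LABEL.get(idx_b):
--         return SEGMENT_COLORS[la]
--     return (255, 220, 150)
-- ===== Notes on version B (the rewrite author's own statement) =====
-- stated objective: idiomatic
-- what changed: Replaces the scan over six (set, label) groups by a single flat index-to-label table built once at module scope; the body is two constant-time lookups and an equality test (guarded so two unmapped indices do not compare equal).
import Mathlib
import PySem

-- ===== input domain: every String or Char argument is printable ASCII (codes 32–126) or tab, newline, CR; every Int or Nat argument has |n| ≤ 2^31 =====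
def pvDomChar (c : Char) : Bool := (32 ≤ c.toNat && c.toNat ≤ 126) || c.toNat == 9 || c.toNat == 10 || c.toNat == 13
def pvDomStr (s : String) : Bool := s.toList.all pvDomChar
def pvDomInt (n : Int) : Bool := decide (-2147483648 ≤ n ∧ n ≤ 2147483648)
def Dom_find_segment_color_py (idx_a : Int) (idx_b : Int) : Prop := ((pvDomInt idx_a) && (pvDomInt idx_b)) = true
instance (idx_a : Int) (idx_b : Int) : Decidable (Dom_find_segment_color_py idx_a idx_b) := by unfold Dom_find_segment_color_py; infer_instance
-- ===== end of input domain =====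

-- B replaces A's scan over six (set, label) groups by one flat index→label table and two lookups (idiomatic; same behaviour).


-- ===== PORT A =====
def headSet : PySem.Set Int := PySem.Set.ofList [1, 15, 16, 17, 18]
def torsoSet : PySem.Set Int := PySem.Set.ofList [0, 2]
def leftArmSet : PySem.Set Int := PySem.Set.ofList [3, 4, 5]
def rightArmSet : PySem.Set Int := PySem.Set.ofList [9, 10, 11]
def leftLegSet : PySem.Set Int := PySem.Set.ofList [6, 7, 8]
def rightLegSet : PySem.Set Int := PySem.Set.ofList [12, 13, 14]

def segmentColors : PySem.Dict String (Int × Int × Int) := PySem.Dict.mk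
  [("head", (250, 235, 215)), ("torso", (255, 180, 90)), ("left_arm", (255, 120, 120)),
   ("right_arm", (120, 200, 255)), ("left_leg", (120, 255, 180)), ("right_leg", (255, 200, 130))]

-- the for-loop with early return over `groups`; SEGMENT_COLORS[label] is get? with a dummy
-- default — exact because every label in `groups` is a key of segmentColors (Python never raises KeyError here)
def findGroupsLoop (idx_a : Int) (idx_b : Int) : List (PySem.Set Int × String) → Int × Int × Int
  | [] => (255, 220, 150)
  | (group, label) :: rest =>
    if PySem.Set.contains group idx_a && PySem.Set.contains group idx_b then
      (segmentColors.get? label).getD (0, 0, 0)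
    else findGroupsLoop idx_a idx_b rest

def find_segment_color_py (idx_a : Int) (idx_b : Int) : Int × Int × Int :=
  findGroupsLoop idx_a idx_b
    [(headSet, "head"), (torsoSet, "torso"), (leftArmSet, "left_arm"),
     (rightArmSet, "right_arm"), (leftLegSet, "left_leg"), (rightLegSet, "right_leg")]

-- ===== PORT B =====
def idxToLabel : PySem.Dict Int String := PySem.Dict.mk
  [((1 : Int), "head"), (15, "head"), (16, "head"), (17, "head"), (18, "head"),
   (0, "torso"), (2, "torso"),
   (3, "left_arm"), (4, "left_arm"), (5, "left_arm"),
   (9, "right_arm"), (10, "right_arm"), (11, "right_arm"),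
   (6, "left_leg"), (7, "left_leg"), (8, "left_leg"),
   (12, "right_leg"), (13, "right_leg"), (14, "right_leg")]

-- la = _IDX_TO_LABEL.get(idx_a); the 'la is not None' guard is the match on Option;
-- SEGMENT_COLORS[la] again get? with a dummy default (la is always a key when some)
def find_segment_color_py_alt (idx_a : Int) (idx_b : Int) : Int × Int × Int :=
  match idxToLabel.get? idx_a with
  | some la => if some la == idxToLabel.get? idx_b then (segmentColors.get? la).getD (0, 0, 0)
               else (255, 220, 150)
  | none => (255, 220, 150)

-- ===== PRECONDITION & SPEC =====
def Spec_find_segment_color_py (idx_a : Int) (idx_b : Int) (out : Int × Int × Int) : Prop := out = find_segment_color_py_alt idx_a idx_b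
instance (idx_a : Int) (idx_b : Int) (out : Int × Int × Int) : Decidable (Spec_find_segment_color_py idx_a idx_b out) := by unfold Spec_find_segment_color_py; infer_instance

-- ===== CLAIM (what is proved, stated in full; the proofs are below) =====
def Claim_equal_find_segment_color_py : Prop := ∀ (idx_a : Int) (idx_b : Int), Dom_find_segment_color_py idx_a idx_b → Spec_find_segment_color_py idx_a idx_b (find_segment_color_py idx_a idx_b)

-- ===== LEMMAS AND PROOFS =====
-- an index outside 0..18 is in none of the six sets and not a key of idxToLabel
theorem get?_idxToLabel_out (a : Int) (h : a < 0 ∨ 18 < a) : idxToLabel.get? a = none := by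
  simp [idxToLabel, PySem.Dict.get?]; omega

theorem contains_out (a : Int) (h : a < 0 ∨ 18 < a) :
    a ∉ headSet ∧ a ∉ torsoSet ∧ a ∉ leftArmSet ∧ a ∉ rightArmSet ∧
    a ∉ leftLegSet ∧ a ∉ rightLegSet := by
  refine ⟨?_, ?_, ?_, ?_, ?_, ?_⟩ <;>
    simp [headSet, torsoSet, leftArmSet, rightArmSet, leftLegSet, rightLegSet,
      PySem.Set.ofList] <;> omega

-- ===== VERDICT (by name: the statement is the Claim_ definition above) =====
theorem find_segment_color_py_spec : Claim_equal_find_segment_color_py := by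
  intro a b _
  unfold Spec_find_segment_color_py
  by_cases ha : 0 ≤ a ∧ a ≤ 18
  · by_cases hb : 0 ≤ b ∧ b ≤ 18
    · obtain ⟨ha1, ha2⟩ := ha
      obtain ⟨hb1, hb2⟩ := hb
      interval_cases a <;> interval_cases b <;> rfl
    · have hb' : b < 0 ∨ 18 < b := by omega
      obtain ⟨c1, c2, c3, c4, c5, c6⟩ := contains_out b hb'
      simp [find_segment_color_py, findGroupsLoop, find_segment_color_py_alt,
        get?_idxToLabel_out b hb', c1, c2, c3, c4, c5, c6]
      cases idxToLabel.get? a <;> rfl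
  · have ha' : a < 0 ∨ 18 < a := by omega
    obtain ⟨c1, c2, c3, c4, c5, c6⟩ := contains_out a ha'
    simp [find_segment_color_py, findGroupsLoop, find_segment_color_py_alt,
      get?_idxToLabel_out a ha', c1, c2, c3, c4, c5, c6]
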